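-- pv_equiv track=rewrite | github.com/milovanovic/TakprogZbirka | 22_sezona-2022-23/01_KV1-2022-23/01_sudar/sudar.py | sudar
-- ===== SOURCE A (Python) =====
-- def sudar(x, y):
--     xrev, yrev = x[::-1], y[::-1]
--     lenx, leny = len(x), len(y)
--     lenmx = max(lenx, leny)
--     rrev = ''
--     try:
--         for i in range(lenmx):
--             if xrev[i] > yrev[i]:
--                 rrev += xrev[i]
--             elif yrev[i] > xrev[i]:
--                 rrev += yrev[i]
--             else:
--                 rrev += xrev[i] + yrev[i]
--     except IndexError:
--         if lenx > leny:
--             rrev += x[:lenx-leny][::-1]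
--         elif leny > lenx:
--             rrev += y[:leny-lenx][::-1]
--     return rrev[::-1]
-- ===== SOURCE B (Python) =====
-- def sudar(x, y):
--     d = len(x) - len(y)
--     if d >= 0:
--         head, xs, ys = x[:d], x[d:], y
--     else:
--         head, xs, ys = y[:-d], x, y[-d:]
--     parts = [head]
--     for a, b in zip(xs, ys):
--         parts.append(a if a > b else b if b > a else a + b)
--     return ''.join(parts)
-- ===== Notes on version B (the rewrite author's own statement) =====
-- stated objective: faster
-- what changed: Replaced A's reverse-both-strings, index-loop-with-IndexError-driven tail handling and quadratic-prone string += by a forward alignment pass: the longer string's leading prefix is taken up front by a length-difference slice, then one left-to-right zip over the aligned suffixes collects pieces joined once at the end, with no reversals and no exception control flow.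
import Mathlib
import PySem

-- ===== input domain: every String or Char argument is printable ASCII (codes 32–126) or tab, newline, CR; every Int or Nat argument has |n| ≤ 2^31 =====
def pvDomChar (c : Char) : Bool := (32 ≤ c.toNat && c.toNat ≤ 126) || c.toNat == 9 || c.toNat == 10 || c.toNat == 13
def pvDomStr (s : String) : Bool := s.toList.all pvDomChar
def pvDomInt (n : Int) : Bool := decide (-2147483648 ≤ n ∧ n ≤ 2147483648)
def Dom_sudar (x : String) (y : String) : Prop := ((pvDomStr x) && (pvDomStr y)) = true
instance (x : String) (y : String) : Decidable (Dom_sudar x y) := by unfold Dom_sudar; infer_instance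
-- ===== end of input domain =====

-- B drops A's reversals and IndexError-driven tail: it emits the longer string's
-- leading prefix first, then one forward zip over the length-aligned suffixes.

-- ===== PORT A =====
-- A's for-loop over range(lenmx) with try/except IndexError: returns the
-- accumulated rrev plus a flag saying whether an IndexError was raised.
def sudarLoop (xrev yrev : List Char) (fuel i : Nat) (rrev : List Char) :
    List Char × Bool :=
  match fuel with
  | 0 => (rrev, false)
  | fuel + 1 =>
    match PySem.List.pyGet? xrev (i : Int), PySem.List.pyGet? yrev (i : Int) with
    | some a, some b =>
      if a > b then sudarLoop xrev yrev fuel (i + 1) (rrev ++ [a])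
      else if b > a then sudarLoop xrev yrev fuel (i + 1) (rrev ++ [b])
      else sudarLoop xrev yrev fuel (i + 1) (rrev ++ [a, b])
    | _, _ => (rrev, true)   -- IndexError

def sudar (x : String) (y : String) : String :=
  let xl := x.toList
  let yl := y.toList
  let xrev := xl.reverse            -- x[::-1]
  let yrev := yl.reverse            -- y[::-1]
  let lenx := xl.length
  let leny := yl.length
  let lenmx := max lenx leny
  let r := sudarLoop xrev yrev lenmx 0 []
  let rrev :=
    if r.2 then                     -- except IndexError branch
      if lenx > leny then r.1 ++ (xl.take (lenx - leny)).reverse   -- x[:lenx-leny][::-1]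
      else if leny > lenx then r.1 ++ (yl.take (leny - lenx)).reverse
      else r.1
    else r.1
  String.ofList rrev.reverse            -- rrev[::-1]

-- ===== PORT B =====
-- the per-pair piece appended inside B's for-loop
def pvPiece (a b : Char) : List Char :=
  if a > b then [a] else if b > a then [b] else [a, b]

def sudar_alt (x : String) (y : String) : String :=
  let xl := x.toList
  let yl := y.toList
  -- d = len(x) - len(y); if d >= 0 …  (the test d ≥ 0 is the length comparison)
  if yl.length ≤ xl.length then
    let d := xl.length - yl.length
    let head := xl.take d             -- x[:d]
    let xs := xl.drop d               -- x[d:]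
    let ys := yl
    String.ofList (head ++ ((xs.zip ys).map (fun p => pvPiece p.1 p.2)).flatten)  -- ''.join(parts)
  else
    let d := yl.length - xl.length    -- = -d in Python
    let head := yl.take d             -- y[:-d]
    let xs := xl
    let ys := yl.drop d               -- y[-d:]
    String.ofList (head ++ ((xs.zip ys).map (fun p => pvPiece p.1 p.2)).flatten)

-- ===== PRECONDITION & SPEC =====
def Spec_sudar (x : String) (y : String) (out : String) : Prop := out = sudar_alt x y
instance (x : String) (y : String) (out : String) : Decidable (Spec_sudar x y out) := by unfold Spec_sudar; infer_instance

-- ===== CLAIM (what is proved, stated in full; the proofs are below) =====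
def Claim_equal_sudar : Prop := ∀ (x : String) (y : String), Dom_sudar x y → Spec_sudar x y (sudar x y)

-- ===== LEMMAS AND PROOFS =====

-- proof-side: the common-prefix part of A's merge (what the try-body emits)
def mergeCommon : List Char → List Char → List Char
  | a :: as, b :: bs => pvPiece a b ++ mergeCommon as bs
  | _, _ => []

theorem mergeCommon_nil_left (v : List Char) : mergeCommon [] v = [] := by
  cases v <;> rfl

theorem mergeCommon_nil_right (u : List Char) : mergeCommon u [] = [] := by
  cases u <;> rfl

-- mergeCommon only consumes the shorter list: extra tail on either side is ignored
theorem mergeCommon_append_left (u v w : List Char) (h : u.length = v.length) :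
    mergeCommon (u ++ w) v = mergeCommon u v := by
  induction u generalizing v with
  | nil =>
    have : v = [] := List.eq_nil_of_length_eq_zero h.symm
    subst this; simp [mergeCommon_nil_right]
  | cons a as ih =>
    cases v with
    | nil => simp at h
    | cons b bs =>
      simp only [List.length_cons, Nat.succ_inj] at h
      simp [mergeCommon, ih bs h]

theorem mergeCommon_append_right (u v w : List Char) (h : u.length = v.length) :
    mergeCommon u (v ++ w) = mergeCommon u v := by
  induction u generalizing v with
  | nil => simp [mergeCommon_nil_left]
  | cons a as ih =>
    cases v with
    | nil => simp at h
    | cons b bs =>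
      simp only [List.length_cons, Nat.succ_inj] at h
      simp [mergeCommon, ih bs h]

theorem mergeCommon_snoc (u v : List Char) (a b : Char) (h : u.length = v.length) :
    mergeCommon (u ++ [a]) (v ++ [b]) = mergeCommon u v ++ pvPiece a b := by
  induction u generalizing v with
  | nil =>
    have : v = [] := List.eq_nil_of_length_eq_zero h.symm
    subst this; simp [mergeCommon]
  | cons c cs ih =>
    cases v with
    | nil => simp at h
    | cons d ds =>
      simp only [List.length_cons, Nat.succ_inj] at h
      simp [mergeCommon, ih ds h]

theorem pvPiece_reverse (a b : Char) : (pvPiece a b).reverse = pvPiece a b := by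
  unfold pvPiece
  by_cases h1 : a > b
  · simp [h1]
  · by_cases h2 : b > a
    · simp [h1, h2]
    · simp only [gt_iff_lt, not_lt] at h1 h2
      have : a = b := le_antisymm h1 h2
      subst this; simp

-- reversed merge of the reverses = forward zip of the pieces
theorem mergeCommon_reverse_eq (u v : List Char) (h : u.length = v.length) :
    (mergeCommon u.reverse v.reverse).reverse
      = ((u.zip v).map (fun p => pvPiece p.1 p.2)).flatten := by
  induction u generalizing v with
  | nil =>
    have : v = [] := List.eq_nil_of_length_eq_zero h.symm
    subst this; simp [mergeCommon]
  | cons a as ih =>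
    cases v with
    | nil => simp at h
    | cons b bs =>
      simp only [List.length_cons, Nat.succ_inj] at h
      have hsnoc := mergeCommon_snoc as.reverse bs.reverse a b (by simp [h])
      simp only [List.reverse_cons, hsnoc, List.reverse_append, pvPiece_reverse,
        List.zip_cons_cons, List.map_cons, List.flatten_cons, ih bs h]

-- A's loop, run from index i with matching fuel: it appends the common merge of
-- the drops and reports whether it ran off the shorter list.
theorem sudarLoop_spec (u v : List Char) (i : Nat) (acc : List Char)
    (hi : i ≤ min u.length v.length) :
    sudarLoop u v (max u.length v.length - i) i acc =
      (acc ++ mergeCommon (u.drop i) (v.drop i), decide (u.length ≠ v.length)) := by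
  have h := Nat.le_min.mp hi
  by_cases hlt : i < min u.length v.length
  · have hu : i < u.length := lt_of_lt_of_le hlt (Nat.min_le_left _ _)
    have hv : i < v.length := lt_of_lt_of_le hlt (Nat.min_le_right _ _)
    have hfuel : max u.length v.length - i = (max u.length v.length - (i + 1)) + 1 := by
      omega
    rw [hfuel]
    have hgu := PySem.List.pyGet?_ofNat (xs := u) (n := i) hu
    have hgv := PySem.List.pyGet?_ofNat (xs := v) (n := i) hv
    have hdu : u.drop i = u[i] :: u.drop (i + 1) := by
      rw [List.drop_eq_getElem_cons hu]
    have hdv : v.drop i = v[i] :: v.drop (i + 1) := by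
      rw [List.drop_eq_getElem_cons hv]
    have ih := sudarLoop_spec u v (i + 1)
    unfold sudarLoop
    rw [hgu, hgv]
    simp only
    rw [hdu, hdv]
    by_cases h1 : u[i] > v[i]
    · simp only [h1, if_pos]
      rw [ih (acc ++ [u[i]]) (by omega)]
      simp [mergeCommon, pvPiece, h1]
    · by_cases h2 : v[i] > u[i]
      · rw [if_neg h1, if_pos h2, ih (acc ++ [v[i]]) (by omega)]
        simp [mergeCommon, pvPiece, h1, h2]
      · rw [if_neg h1, if_neg h2, ih (acc ++ [u[i], v[i]]) (by omega)]
        simp [mergeCommon, pvPiece, h1, h2]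
  · -- i = min length: either both exhausted (fuel 0) or one index errors
    have hieq : i = min u.length v.length := le_antisymm hi (not_lt.mp hlt)
    by_cases hEq : u.length = v.length
    · have hfi : max u.length v.length - i = 0 := by omega
      rw [hfi]
      unfold sudarLoop
      have hdu : u.drop i = [] := List.drop_eq_nil_of_le (by omega)
      have hdv : v.drop i = [] := List.drop_eq_nil_of_le (by omega)
      simp [hdu, hdv, mergeCommon, hEq]
    · have hfpos : 0 < max u.length v.length - i := by omega
      obtain ⟨f, hf⟩ := Nat.exists_eq_succ_of_ne_zero (Nat.pos_iff_ne_zero.mp hfpos)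
      rw [hf]
      unfold sudarLoop
      have hone : u.length ≤ i ∨ v.length ≤ i := by omega
      have hmc : mergeCommon (u.drop i) (v.drop i) = [] := by
        rcases hone with h' | h'
        · rw [List.drop_eq_nil_of_le h', mergeCommon_nil_left]
        · rw [List.drop_eq_nil_of_le h', mergeCommon_nil_right]
      rcases hone with h' | h'
      · have : PySem.List.pyGet? u (i : Int) = none := by
          simp [PySem.List.pyGet?_natCast, List.getElem?_eq_none h']
        rw [this]
        simp [hmc, hEq]
      · have : PySem.List.pyGet? v (i : Int) = none := by
          simp [PySem.List.pyGet?_natCast, List.getElem?_eq_none h']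
        rw [this]
        cases PySem.List.pyGet? u (i : Int) <;> simp [hmc, hEq]
termination_by min u.length v.length - i

theorem sudar_eq_alt (x y : String) : sudar x y = sudar_alt x y := by
  unfold sudar sudar_alt
  set xl := x.toList with hxl
  set yl := y.toList with hyl
  have hloop := sudarLoop_spec xl.reverse yl.reverse 0 [] (by omega)
  simp only [Nat.sub_zero, List.length_reverse] at hloop
  simp only [hloop, List.drop_zero, List.nil_append]
  by_cases hEq : xl.length = yl.length
  · simp only [hEq, ne_eq, not_true_eq_false, decide_false]
    rw [if_neg Bool.false_ne_true, if_pos (le_refl yl.length), Nat.sub_self,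
      List.take_zero, List.drop_zero, List.nil_append, mergeCommon_reverse_eq xl yl hEq]
  · simp only [hEq, ne_eq, not_false_iff, decide_true, if_true]
    by_cases hgt : xl.length > yl.length
    · have hle : yl.length ≤ xl.length := le_of_lt hgt
      rw [if_pos hgt, if_pos hle]
      set d := xl.length - yl.length with hd
      have hsplit : xl.reverse = (xl.drop d).reverse ++ (xl.take d).reverse := by
        conv_lhs => rw [← List.take_append_drop d xl]
        rw [List.reverse_append]
      have hlen : (xl.drop d).reverse.length = yl.reverse.length := by
        simp; omega
      rw [hsplit, mergeCommon_append_left _ _ _ hlen,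
        List.reverse_append, List.reverse_reverse,
        mergeCommon_reverse_eq (xl.drop d) yl (by simp; omega)]
    · have hlt' : xl.length < yl.length := by omega
      rw [if_neg hgt, if_pos hlt', if_neg (by omega : ¬ yl.length ≤ xl.length)]
      set d := yl.length - xl.length with hd
      have hsplit : yl.reverse = (yl.drop d).reverse ++ (yl.take d).reverse := by
        conv_lhs => rw [← List.take_append_drop d yl]
        rw [List.reverse_append]
      have hlen : xl.reverse.length = (yl.drop d).reverse.length := by
        simp; omega
      rw [hsplit, mergeCommon_append_right _ _ _ hlen,
        List.reverse_append, List.reverse_reverse,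
        mergeCommon_reverse_eq xl (yl.drop d) (by simp; omega)]

-- ===== VERDICT (by name: the statement is the Claim_ definition above) =====
theorem sudar_spec : Claim_equal_sudar := by
  intro x y _
  exact sudar_eq_alt x y
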